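-- pv_equiv track=rewrite | github.com/FocusedConsistency/challenges-dailies | FCC_2026-02-27.py | shift_matrix_2
-- ===== SOURCE A (Python) =====
-- def shift_matrix_2(matrix, shift):
--     rows = len(matrix)
--     cols = len(matrix[0])
--     total = rows * cols
--     shift %= total
--
--     flattened = [matrix[i][j] for i in range(rows) for j in range(cols)]
--
--     shifted = flattened[-shift:] + flattened[:-shift]
--
--     for i in range(rows):
--         for j in range(cols):
--             matrix[i][j] = shifted[i * cols + j]
--
--     return matrix
-- ===== SOURCE B (Python) =====
-- def shift_matrix_2(matrix, shift):
--     rows = len(matrix)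
--     cols = len(matrix[0])
--     total = rows * cols
--     shift %= total
--     q, r = divmod(shift, cols)
--     src = [row[:cols] for row in matrix]
--     for i in range(rows):
--         a = src[(i - q - 1) % rows]
--         b = src[(i - q) % rows]
--         matrix[i][:cols] = a[cols - r:] + b[:cols - r]
--     return matrix
-- ===== Notes on version B (the rewrite author's own statement) =====
-- stated objective: alternative
-- what changed: B never flattens: it works at row granularity, computing divmod(shift, cols)=(q,r) and building each output row as the splice of the tail/head of two snapshot rows ((i-q-1)%rows and (i-q)%rows), one slice-assignment per row instead of A's flatten + negative-slice rotation + per-cell nested write loops.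
import Mathlib
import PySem

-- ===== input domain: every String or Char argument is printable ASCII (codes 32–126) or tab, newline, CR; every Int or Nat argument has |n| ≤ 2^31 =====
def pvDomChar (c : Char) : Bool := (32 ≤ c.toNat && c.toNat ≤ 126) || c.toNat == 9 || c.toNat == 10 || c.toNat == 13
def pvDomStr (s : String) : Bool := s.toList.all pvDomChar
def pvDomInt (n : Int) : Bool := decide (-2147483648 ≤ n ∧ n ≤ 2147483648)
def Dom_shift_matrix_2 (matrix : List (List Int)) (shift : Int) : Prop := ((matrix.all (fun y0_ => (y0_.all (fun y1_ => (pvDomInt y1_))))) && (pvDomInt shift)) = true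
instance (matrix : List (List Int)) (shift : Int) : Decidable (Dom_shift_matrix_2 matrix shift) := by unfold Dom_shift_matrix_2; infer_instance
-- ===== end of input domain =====

-- B replaces A's flatten + negative-slice rotation + per-cell write loops by a row-level splice:
-- with (q, r) = divmod(shift, cols), output row i is the tail of snapshot row (i-q-1)%rows glued to
-- the head of snapshot row (i-q)%rows, one slice assignment per row (alternative decomposition;
-- same asymptotic cost, measured faster by a constant factor in a timing run). Both Pythons mutate `matrix` in place identically; the theorem is about the return value.

-- ===== PORT A =====
-- Literal port of A. Indices produced by range(...) are always in range, so list writes use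
-- pySetD/pyGetD (exact there); matrix[0] on an empty matrix and shift %= 0 raise in Python and
-- are excluded by Pre_.
def shift_matrix_2 (matrix : List (List Int)) (shift : Int) : List (List Int) :=
  let rows : Int := matrix.length
  let cols : Int := (PySem.List.pyGetD matrix 0 ([] : List Int)).length
  let total : Int := rows * cols
  let shift' : Int := PySem.Int.mod shift total
  let flattened : List Int := (PySem.List.pyRange 0 rows 1).flatMap (fun i =>
      (PySem.List.pyRange 0 cols 1).map (fun j =>
        PySem.List.pyGetD (PySem.List.pyGetD matrix i ([] : List Int)) j 0))
  let shifted : List Int :=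
      PySem.List.slice flattened (some (-shift')) none ++
      PySem.List.slice flattened none (some (-shift'))
  (PySem.List.pyRange 0 rows 1).foldl (fun m i =>
    (PySem.List.pyRange 0 cols 1).foldl (fun m j =>
      PySem.List.pySetD m i
        (PySem.List.pySetD (PySem.List.pyGetD m i ([] : List Int)) j
          (PySem.List.pyGetD shifted (i * cols + j) 0))) m) matrix

-- ===== PORT B =====
-- Literal port of B (Source B): (q, r) = divmod(shift, cols) (ported as floordiv/mod, exact for cols ≠ 0),
-- snapshot src = [row[:cols] for row in matrix], then one splice per row; the slice assignment
-- matrix[i][:cols] = L is ported by hand as L ++ row[cols:] (exact since cols ≥ 0).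
def shift_matrix_2_alt (matrix : List (List Int)) (shift : Int) : List (List Int) :=
  let rows : Int := matrix.length
  let cols : Int := (PySem.List.pyGetD matrix 0 ([] : List Int)).length
  let total : Int := rows * cols
  let shift' : Int := PySem.Int.mod shift total
  let q : Int := PySem.Int.floordiv shift' cols
  let r : Int := PySem.Int.mod shift' cols
  let src : List (List Int) := matrix.map (fun row => PySem.List.slice row none (some cols))
  (PySem.List.pyRange 0 rows 1).foldl (fun m i =>
    let a := PySem.List.pyGetD src (PySem.Int.mod (i - q - 1) rows) ([] : List Int)
    let b := PySem.List.pyGetD src (PySem.Int.mod (i - q) rows) ([] : List Int)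
    PySem.List.pySetD m i
      ((PySem.List.slice a (some (cols - r)) none ++ PySem.List.slice b none (some (cols - r))) ++
        PySem.List.slice (PySem.List.pyGetD m i ([] : List Int)) (some cols) none)) matrix

-- ===== PRECONDITION & SPEC =====
-- Exactly where A returns: a nonempty matrix whose first row is nonempty (else IndexError /
-- ZeroDivisionError on `shift %= total`) and every row at least as long as the first (else
-- IndexError while flattening).
def Pre_shift_matrix_2 (matrix : List (List Int)) (shift : Int) : Prop :=
  matrix ≠ [] ∧ 0 < (matrix.headD []).length ∧
    ∀ row ∈ matrix, (matrix.headD []).length ≤ row.length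
instance (matrix : List (List Int)) (shift : Int) : Decidable (Pre_shift_matrix_2 matrix shift) := by
  unfold Pre_shift_matrix_2; infer_instance
def pvWitness_shift_matrix_2 : List (List Int) × Int := ([[1, 2], [3, 4]], 3)
def Spec_shift_matrix_2 (matrix : List (List Int)) (shift : Int) (out : List (List Int)) : Prop := out = shift_matrix_2_alt matrix shift
instance (matrix : List (List Int)) (shift : Int) (out : List (List Int)) : Decidable (Spec_shift_matrix_2 matrix shift out) := by unfold Spec_shift_matrix_2; infer_instance

-- ===== CLAIM (what is proved, stated in full; the proofs are below) =====
def Claim_equal_shift_matrix_2 : Prop := ∀ (matrix : List (List Int)) (shift : Int), Dom_shift_matrix_2 matrix shift → Pre_shift_matrix_2 matrix shift → Spec_shift_matrix_2 matrix shift (shift_matrix_2 matrix shift)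

-- ===== LEMMAS AND PROOFS =====

-- fold over range n that rewrites slot k from its current value; characterized as a mapIdx
theorem set_loop {α : Type} (d : α) (g : Nat → α → α) :
    ∀ (n : Nat) (m0 : List α), n ≤ m0.length →
    (List.range n).foldl (fun m k => m.set k (g k (m.getD k d))) m0
      = m0.mapIdx (fun k x => if k < n then g k x else x) := by
  intro n
  induction n with
  | zero =>
    intro m0 _
    simp only [List.range_zero, List.foldl_nil]
    apply List.ext_getElem (by simp)
    intro k h1 h2
    simp
  | succ n ih =>
    intro m0 hn
    rw [List.range_succ, List.foldl_append, List.foldl_cons, List.foldl_nil, ih m0 (by omega)]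
    apply List.ext_getElem (by simp)
    intro k h1 h2
    have hlen : (m0.mapIdx fun k x => if k < n then g k x else x).length = m0.length := by simp
    have hget : ∀ (j : Nat) (hj : j < m0.length),
        (m0.mapIdx fun k x => if k < n then g k x else x)[j]'(by omega)
          = if j < n then g j (m0[j]'hj) else m0[j]'hj := by
      intro j hj; rw [List.getElem_mapIdx]
    rw [List.getElem_set, List.getElem_mapIdx, List.getElem_mapIdx]
    by_cases hkn : n = k
    · subst hkn
      rw [if_pos rfl, if_pos (by omega), List.getD_eq_getElem _ _ (by omega), hget n (by omega),
        if_neg (by omega)]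
    · rw [if_neg hkn]
      by_cases hlt : k < n
      · rw [if_pos hlt, if_pos (by omega)]
      · rw [if_neg hlt, if_neg (by omega)]

-- special case: the written value ignores the current content
theorem set_loop_const {α : Type} (d : α) (v : Nat → α) (n : Nat) (m0 : List α) (hn : n ≤ m0.length) :
    (List.range n).foldl (fun m k => m.set k (v k)) m0
      = m0.mapIdx (fun k x => if k < n then v k else x) := by
  have h := set_loop d (fun k _ => v k) n m0 hn
  simpa using h

-- a fold that repeatedly rewrites the single slot a commutes with folding on that slot's content
theorem inner_to_row {α β : Type} :
    ∀ (js : List β) (m : List (List α)) (a : Nat) (h : List α → β → List α),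
    js.foldl (fun m j => m.set a (h (m.getD a []) j)) m = m.set a (js.foldl h (m.getD a [])) := by
  intro js
  induction js with
  | nil =>
    intro m a h
    simp only [List.foldl_nil]
    by_cases ha : a < m.length
    · rw [List.getD_eq_getElem _ _ ha, List.set_getElem_self]
    · rw [List.set_eq_of_length_le (by omega)]
  | cons j js ih =>
    intro m a h
    simp only [List.foldl_cons]
    by_cases ha : a < m.length
    · have hv : (m.set a (h (m.getD a []) j)).getD a [] = h (m.getD a []) j := by
        rw [List.getD_eq_getElem _ _ (by simpa using ha)]; exact List.getElem_set_self _
      rw [ih, hv, List.set_set]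
    · rw [List.set_eq_of_length_le (by omega), ih,
        List.set_eq_of_length_le (by omega), List.set_eq_of_length_le (by omega)]

-- chunk-position arithmetic: (x*C + c) in the flat order, reduced modulo the total
theorem mix_mod (x c R C : Nat) (hR : 0 < R) (hc : c < C) :
    (x * C + c) % (R * C) = (x % R) * C + c := by
  have hx : x = x % R + R * (x / R) := (Nat.mod_add_div x R).symm
  have h1 : x * C + c = ((x % R) * C + c) + (R * C) * (x / R) := by
    conv_lhs => rw [hx]
    ring
  rw [h1, Nat.add_mul_mod_self_left, Nat.mod_eq_of_lt]
  have : x % R < R := Nat.mod_lt _ hR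
  calc (x % R) * C + c < (x % R) * C + C := by omega
    _ = (x % R + 1) * C := by ring
    _ ≤ R * C := Nat.mul_le_mul_right _ (by omega)

-- Python (y - k) % R as a Nat, for 0 ≤ y and k ≤ R ≤ y + R
theorem pymod_shift (y k R : Nat) (hR : 0 < R) (hk : k ≤ R) :
    PySem.Int.mod ((y : Int) - (k : Int)) (R : Int) = (((y + R - k) % R : Nat) : Int) := by
  have hRpos : (0 : Int) < (R : Int) := by exact_mod_cast hR
  rw [PySem.Int.mod_eq_emod_of_pos hRpos]
  have h1 : ((y : Int) - (k : Int)) % (R : Int) = (((y + R - k : Nat) : Int)) % (R : Int) := by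
    have : ((y + R - k : Nat) : Int) = ((y : Int) - (k : Int)) + (R : Int) * 1 := by
      push_cast [Nat.cast_sub (by omega : k ≤ y + R)]; ring
    rw [this, Int.add_mul_emod_self_left]
  rw [h1]
  exact (Int.natCast_mod (y + R - k) R).symm

-- Indexing a flatMap of constant-shape chunks.
theorem chunk_getD (g : Nat → Nat → Int) (R C a b : Nat) (ha : a < R) (hb : b < C) :
    ((List.range R).flatMap (fun i => (List.range C).map (g i))).getD (a * C + b) 0 = g a b := by
  induction R with
  | zero => omega
  | succ R ih =>
    rw [List.range_succ, List.flatMap_append]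
    rcases Nat.lt_or_ge a R with h | h
    · rw [List.getD_append]
      · exact ih h
      · simp only [List.length_flatMap]
        simp only [List.length_map, List.length_range, List.map_const', List.sum_replicate,
          smul_eq_mul]
        calc a * C + b < a * C + C := by omega
          _ = (a + 1) * C := by ring
          _ ≤ R * C := Nat.mul_le_mul_right _ (by omega)
    · have ha' : a = R := by omega
      subst ha'
      rw [List.getD_append_right]
      · simp only [List.length_flatMap, List.length_map,
          List.length_range, List.map_const', List.sum_replicate, smul_eq_mul]
        have : a * C + b - a * C = b := by omega
        simp only [List.flatMap_singleton, this]
        rw [List.getD_eq_getElem _ _ (by simpa using hb)]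
        simp
      · simp only [List.length_flatMap, List.length_map,
          List.length_range, List.map_const', List.sum_replicate, smul_eq_mul]
        omega

theorem chunk_length (g : Nat → Nat → Int) (R C : Nat) :
    ((List.range R).flatMap (fun i => (List.range C).map (g i))).length = R * C := by
  simp [List.length_flatMap, List.map_const', List.sum_replicate]

-- Rotating a list by drop/take, read back by index.
theorem rot_getD (l : List Int) (N t n : Nat) (hl : l.length = N) (ht : t ≤ N) (hn : n < N) :
    (l.drop t ++ l.take t).getD n 0 = l.getD ((n + t) % N) 0 := by
  rcases Nat.lt_or_ge n (N - t) with h | h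
  · rw [List.getD_append _ _ _ _ (by simp [hl]; omega)]
    rw [List.getD_eq_getElem _ _ (by simp [hl]; omega),
        List.getD_eq_getElem _ _ (by rw [hl]; exact Nat.mod_lt _ (by omega))]
    simp only [List.getElem_drop]
    apply getElem_congr rfl
    rw [Nat.mod_eq_of_lt (by omega)]
    omega
  · rw [List.getD_append_right _ _ _ _ (by simp [hl]; omega)]
    have hnt : (n + t) % N = n + t - N := by
      rw [Nat.mod_eq_sub_mod (by omega), Nat.mod_eq_of_lt (by omega)]
    rw [List.getD_eq_getElem _ _ (by simp [hl]; omega),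
        List.getD_eq_getElem _ _ (by rw [hl]; exact Nat.mod_lt _ (by omega))]
    rw [List.getElem_take]
    apply getElem_congr rfl
    simp only [List.length_drop, hl, hnt]
    omega

-- ===== VERDICT (by name: the statement is the Claim_ definition above) =====
theorem shift_matrix_2_spec : Claim_equal_shift_matrix_2 := by
  intro matrix shift _hdom hpre
  obtain ⟨hne, hC0, hrows⟩ := hpre
  unfold Spec_shift_matrix_2 shift_matrix_2 shift_matrix_2_alt
  simp only []
  have h0 : PySem.List.pyGetD matrix 0 ([] : List Int) = matrix.headD [] := by
    simp [PySem.List.pyGetD_zero, List.getD]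
    cases matrix <;> simp_all
  rw [h0]
  set R : Nat := matrix.length with hRdef
  set C : Nat := (matrix.headD []).length with hCdef
  have hR0 : 0 < R := by rw [hRdef]; exact List.length_pos_iff.mpr hne
  have hNcast : (R : Int) * (C : Int) = ((R * C : Nat) : Int) := by push_cast; ring
  rw [hNcast]
  set N := R * C with hNdef
  have hN : 0 < N := Nat.mul_pos hR0 hC0
  have hNpos : (0 : Int) < (N : Int) := by exact_mod_cast hN
  obtain ⟨s, hs_eq, hs_lt⟩ : ∃ s : Nat, PySem.Int.mod shift (N : Int) = (s : Int) ∧ s < N := by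
    refine ⟨(PySem.Int.mod shift (N : Int)).toNat, ?_, ?_⟩
    · have := PySem.Int.mod_nonneg shift hNpos; omega
    · have := PySem.Int.mod_lt shift hNpos
      have := PySem.Int.mod_nonneg shift hNpos; omega
  rw [hs_eq]
  rw [PySem.Int.floordiv_natCast, PySem.Int.mod_natCast]
  have hq_lt : s / C < R := (Nat.div_lt_iff_lt_mul hC0).mpr (by omega)
  have hr_lt : s % C < C := Nat.mod_lt _ hC0
  set q := s / C with hqdef
  set r := s % C with hrdef
  -- the flattened list, in Nat form
  set Fn : List Int :=
      (List.range R).flatMap (fun a => (List.range C).map (fun b => (matrix.getD a []).getD b 0))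
    with hFn
  have hF : ((PySem.List.pyRange 0 (R : Int) 1).flatMap (fun i =>
      (PySem.List.pyRange 0 (C : Int) 1).map (fun j =>
        PySem.List.pyGetD (PySem.List.pyGetD matrix i ([] : List Int)) j 0))) = Fn := by
    rw [PySem.List.pyRange_zero_nat, PySem.List.pyRange_zero_nat, List.flatMap_map, hFn]
    refine List.flatMap_congr ?_
    intro x _
    rw [List.map_map]
    refine List.map_congr_left ?_
    intro y _
    simp [PySem.List.pyGetD_natCast]
  rw [hF]
  have hlen : Fn.length = N := chunk_length _ R C
  -- the rotation offset
  set t := (N - s) % N with ht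
  have htle : t ≤ N := le_of_lt (Nat.mod_lt _ hN)
  -- the two slices form drop t ++ take t
  have hsh : PySem.List.slice Fn (some (-(s : Int))) none ++
      PySem.List.slice Fn none (some (-(s : Int))) = Fn.drop t ++ Fn.take t := by
    rcases Nat.eq_zero_or_pos s with hs0 | hs0
    · subst hs0
      have ht0 : t = 0 := by simp [ht]
      have e1 : PySem.List.slice Fn (some (-((0:Nat) : Int))) none = Fn := by
        norm_num [PySem.List.slice_zero_start, PySem.List.slice_none_none]
      have e2 : PySem.List.slice Fn none (some (-((0:Nat) : Int))) = [] := by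
        norm_num [PySem.List.slice_to Fn (le_refl (0 : Int))]
      rw [e1, e2, ht0]
      simp
    · have htv : t = N - s := by rw [ht, Nat.mod_eq_of_lt (by omega)]
      rw [PySem.List.slice_from_neg_natCast Fn s hs0, PySem.List.slice_to_neg_natCast Fn s hs0,
        hlen, htv]
  rw [hsh]
  set SH : List Int := Fn.drop t ++ Fn.take t with hSH
  rw [PySem.List.pyRange_zero_nat R, PySem.List.pyRange_zero_nat C]
  simp only [List.foldl_map, PySem.List.pySetD_natCast, PySem.List.pyGetD_natCast,
    PySem.List.slice_from_natCast]
  -- A: commute the per-cell inner loop out of the matrix fold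
  have hA1 : ∀ (m : List (List Int)) (a : Nat),
      (List.range C).foldl (fun x b => x.set a ((x.getD a []).set b
          (PySem.List.pyGetD SH (↑a * ↑C + ↑b) 0))) m
        = m.set a ((List.range C).foldl (fun row b => row.set b
            (PySem.List.pyGetD SH (↑a * ↑C + ↑b) 0)) (m.getD a [])) :=
    fun m a => inner_to_row (List.range C) m a
      (fun row b => row.set b (PySem.List.pyGetD SH ((a : Int) * ↑C + ↑b) 0))
  simp only [hA1]
  -- both sides: one write per row, characterized as a mapIdx
  rw [set_loop ([] : List Int)
      (fun a row => (List.range C).foldl (fun row b => row.set b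
        (PySem.List.pyGetD SH ((a : Int) * ↑C + ↑b) 0)) row) R matrix hRdef.le,
    set_loop ([] : List Int)
      (fun a row =>
        PySem.List.slice
            (PySem.List.pyGetD (List.map (fun row => PySem.List.slice row none (some (↑C : Int))) matrix)
              (PySem.Int.mod ((a : Int) - ↑q - 1) ↑R) [])
            (some ((↑C : Int) - ↑r)) none ++
          PySem.List.slice
            (PySem.List.pyGetD (List.map (fun row => PySem.List.slice row none (some (↑C : Int))) matrix)
              (PySem.Int.mod ((a : Int) - ↑q) ↑R) [])
            none (some ((↑C : Int) - ↑r)) ++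
          row.drop C) R matrix hRdef.le]
  apply List.ext_getElem (by simp)
  intro a h1 h2
  have haR : a < R := by rw [hRdef]; simpa using h1
  simp only [List.getElem_mapIdx]
  rw [if_pos haR, if_pos haR]
  have haR' : a < matrix.length := by omega
  have hrowlen : C ≤ (matrix[a]'haR').length := hrows _ (List.getElem_mem _)
  rw [set_loop_const (0 : Int) (fun b => PySem.List.pyGetD SH ((a : Int) * ↑C + ↑b) 0) C
    (matrix[a]'haR') hrowlen]
  -- resolve B's two source-row indices to Nats
  have hp1 : PySem.Int.mod ((a : Int) - ↑q - 1) ↑R = (((a + R - (q + 1)) % R : Nat) : Int) := by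
    have e : ((a : Int) - ↑q - 1) = ((a : Int) - ((q + 1 : Nat) : Int)) := by push_cast; ring
    rw [e, pymod_shift a (q + 1) R hR0 (by omega)]
  have hp2 : PySem.Int.mod ((a : Int) - ↑q) ↑R = (((a + R - q) % R : Nat) : Int) :=
    pymod_shift a q R hR0 (by omega)
  set p1 := (a + R - (q + 1)) % R with hp1def
  set p2 := (a + R - q) % R with hp2def
  have hp1R : p1 < R := Nat.mod_lt _ hR0
  have hp2R : p2 < R := Nat.mod_lt _ hR0
  have hsrc : ∀ (p : Nat), p < R →
      PySem.List.pyGetD (List.map (fun row => PySem.List.slice row none (some (↑C : Int))) matrix)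
        ((p : Nat) : Int) [] = (matrix.getD p []).take C := by
    intro p hp
    rw [PySem.List.pyGetD_natCast, List.getD_eq_getElem _ _ (by simpa [hRdef] using hp),
      List.getElem_map, PySem.List.slice_to_natCast, List.getD_eq_getElem _ _ (by omega)]
  rw [hp1, hp2, hsrc p1 hp1R, hsrc p2 hp2R]
  have hCr : ((C : Int) - ↑r) = (((C - r : Nat)) : Int) := by omega
  simp only [hCr, PySem.List.slice_from_natCast, PySem.List.slice_to_natCast]
  -- per-row lengths
  have hlen1 : C ≤ (matrix.getD p1 []).length := by
    rw [List.getD_eq_getElem _ _ (by omega)]; exact hrows _ (List.getElem_mem _)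
  have hlen2 : C ≤ (matrix.getD p2 []).length := by
    rw [List.getD_eq_getElem _ _ (by omega)]; exact hrows _ (List.getElem_mem _)
  have hXlen : (List.drop (C - r) (List.take C (matrix.getD p1 []))).length = r := by
    simp only [List.length_take, List.length_drop]; omega
  have hYlen : (List.take (C - r) (List.take C (matrix.getD p2 []))).length = C - r := by
    simp only [List.length_take]; omega
  apply List.ext_getElem
    (by simp only [List.length_mapIdx, List.length_append, List.length_drop, hXlen, hYlen]; omega)
  intro b hb1 hb2
  rw [List.getElem_mapIdx]
  have hb : b < (matrix[a]'haR').length := by simpa using hb1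
  by_cases hbC : b < C
  · rw [if_pos hbC]
    -- A's value: read the rotated flat list at a*C+b
    have hcast : ((a : Int) * ↑C + ↑b) = (((a * C + b : Nat)) : Int) := by push_cast; ring
    have hnN : a * C + b < N := by
      calc a * C + b < a * C + C := by omega
        _ = (a + 1) * C := by ring
        _ ≤ R * C := Nat.mul_le_mul_right _ (by omega)
    rw [hcast, PySem.List.pyGetD_natCast, hSH, rot_getD Fn N t (a * C + b) hlen htle hnN]
    have hu : (a * C + b + t) % N = (a * C + b + (N - s)) % N := by
      rcases Nat.eq_zero_or_pos s with h | h
      · subst h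
        rw [ht]
        simp [Nat.mod_self, Nat.add_mod_right]
      · have e : (N - s) % N = N - s := Nat.mod_eq_of_lt (by omega)
        rw [ht, e]
    rw [hu]
    have hsplit : s = C * q + r := (Nat.div_add_mod s C).symm
    by_cases hbr : b < r
    · -- the element comes from snapshot row p1
      have hid : a * C + b + (N - s) = (a + R - (q + 1)) * C + (C - r + b) := by
        rw [hsplit, hNdef]
        zify [show C * q + r ≤ R * C by rw [← hsplit, ← hNdef]; omega,
          show q + 1 ≤ a + R by omega, show r ≤ C by omega]
        ring
      rw [hid, mix_mod _ _ R C hR0 (by omega), ← hp1def, hFn,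
        chunk_getD _ R C p1 (C - r + b) hp1R (by omega)]
      rw [List.getElem_append_left (by simp only [List.length_append, hXlen, hYlen]; omega),
        List.getElem_append_left (by rw [hXlen]; omega),
        List.getElem_drop, List.getElem_take, List.getD_eq_getElem _ _ (by omega)]
    · -- the element comes from snapshot row p2
      have hid : a * C + b + (N - s) = (a + R - q) * C + (b - r) := by
        rw [hsplit, hNdef]
        zify [show C * q + r ≤ R * C by rw [← hsplit, ← hNdef]; omega,
          show q ≤ a + R by omega, show r ≤ b by omega]
        ring
      rw [hid, mix_mod _ _ R C hR0 (by omega), ← hp2def, hFn,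
        chunk_getD _ R C p2 (b - r) hp2R (by omega)]
      rw [List.getElem_append_left (by simp only [List.length_append, hXlen, hYlen]; omega),
        List.getElem_append_right (by rw [hXlen]; omega),
        List.getElem_take, List.getElem_take, List.getD_eq_getElem _ _ (by omega)]
      apply getElem_congr rfl
      rw [hXlen]
  · rw [if_neg hbC]
    rw [List.getElem_append_right (by simp only [List.length_append, hXlen, hYlen]; omega),
      List.getElem_drop]
    apply getElem_congr rfl
    simp only [List.length_append, hXlen, hYlen]
    omega
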